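-- pv_equiv track=rewrite | github.com/facelessuser/BracketHighlighter | ure.py | find_char_groups
-- ===== SOURCE A (Python) =====
-- def find_char_groups(s):
--     """
--     Find character groups
--     """
--     pos = 0
--     groups = []
--     escaped = False
--     found = False
--     first = None
--     for c in s:
--         if c == "\\":
--             escaped = not escaped
--         elif escaped:
--             escaped = False
--         elif c == "[" and not found:
--             found = True
--             first = pos
--         elif c == "]" and found:
--             groups.append((first, pos))
--         pos += 1
--     return groups
-- ===== SOURCE B (Python) =====
-- def find_char_groups(s):
--     """
--     Find character groups
--     """
--     def unescaped(i):
--         # a character is active iff the run of backslashes just before it is even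
--         j = i
--         while j > 0 and s[j - 1] == "\\":
--             j -= 1
--         return (i - j) % 2 == 0
--
--     opens = [i for i, c in enumerate(s) if c == "[" and unescaped(i)]
--     closes = [i for i, c in enumerate(s) if c == "]" and unescaped(i)]
--     if not opens:
--         return []
--     first = opens[0]
--     return [(first, j) for j in closes if j > first]
-- ===== Notes on version B (the rewrite author's own statement) =====
-- stated objective: alternative
-- what changed: Replaced A's single stateful scan with escaped/found/first flags by a staged, declarative computation: escapedness is decided per position by the parity of the backward backslash run, open/close bracket index lists are collected by comprehensions, and the result is the first open paired with every later close via a filter.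
import Mathlib
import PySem

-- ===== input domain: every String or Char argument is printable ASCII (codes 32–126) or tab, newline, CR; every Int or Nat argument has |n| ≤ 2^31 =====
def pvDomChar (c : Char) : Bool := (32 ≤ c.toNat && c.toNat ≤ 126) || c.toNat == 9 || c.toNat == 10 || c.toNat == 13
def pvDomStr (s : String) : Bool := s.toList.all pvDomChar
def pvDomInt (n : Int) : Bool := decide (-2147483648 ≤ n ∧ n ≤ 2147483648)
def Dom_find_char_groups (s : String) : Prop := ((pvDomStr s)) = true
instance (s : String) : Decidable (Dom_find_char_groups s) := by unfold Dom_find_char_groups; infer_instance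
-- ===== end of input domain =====

-- B replaces A's single stateful scan (escaped/found flags) by a declarative, staged
-- computation: per-index backward backslash-run parity decides escapedness, open/close
-- index lists are collected by comprehensions, and the first open is paired with every
-- later close by a filter; alternative decomposition, same O(n) cost.

-- ===== PORT A =====
-- A's for-loop: state (pos, groups, escaped, found, first); `first` is None in Python
-- until assigned, and is only read after assignment (found = true), so modelled as Int 0.
def findCharGroupsLoopA : List Char → Int → List (Int × Int) → Bool → Bool → Int → List (Int × Int)
  | [], _, groups, _, _, _ => groups
  | c :: rest, pos, groups, escaped, found, first =>
    if c = '\\' then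
      findCharGroupsLoopA rest (pos + 1) groups (!escaped) found first
    else if escaped then
      findCharGroupsLoopA rest (pos + 1) groups false found first
    else if c = '[' ∧ ¬ (found = true) then
      findCharGroupsLoopA rest (pos + 1) groups escaped true pos
    else if c = ']' ∧ found = true then
      findCharGroupsLoopA rest (pos + 1) (groups ++ [(first, pos)]) escaped found first
    else
      findCharGroupsLoopA rest (pos + 1) groups escaped found first

def find_char_groups (s : String) : List (Int × Int) :=
  findCharGroupsLoopA s.toList 0 [] false false 0

-- ===== PORT B =====
-- Source B's inner `unescaped(i)`: walk j back over backslashes from i, parity of run length.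
def fcgBackJ (l : List Char) : Nat → Nat
  | 0 => 0
  | j + 1 => if l.getD j ' ' = '\\' then fcgBackJ l j else j + 1

def fcgUnescaped (l : List Char) (i : Nat) : Bool := (i - fcgBackJ l i) % 2 == 0

-- Source B's comprehensions over enumerate(s) and the final pairing filter.
def find_char_groups_alt (s : String) : List (Int × Int) :=
  let l := s.toList
  let opens := (List.range l.length).filter (fun i => l.getD i ' ' == '[' && fcgUnescaped l i)
  let closes := (List.range l.length).filter (fun i => l.getD i ' ' == ']' && fcgUnescaped l i)
  match opens with
  | [] => []
  | first :: _ => (closes.filter (fun j => first < j)).map (fun j => ((first : Int), (j : Int)))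

-- ===== PRECONDITION & SPEC =====
def Spec_find_char_groups (s : String) (out : List (Int × Int)) : Prop := out = find_char_groups_alt s
instance (s : String) (out : List (Int × Int)) : Decidable (Spec_find_char_groups s out) := by unfold Spec_find_char_groups; infer_instance

-- ===== CLAIM (what is proved, stated in full; the proofs are below) =====
def Claim_equal_find_char_groups : Prop := ∀ (s : String), Dom_find_char_groups s → Spec_find_char_groups s (find_char_groups s)

-- ===== LEMMAS AND PROOFS =====

-- events: active (unescaped) bracket positions with their characters
def fcgEvents (l : List Char) (k : Nat) (m : Nat) : List (Nat × Char) :=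
  ((List.range' k m).filter
      (fun i => (l.getD i ' ' == '[' || l.getD i ' ' == ']') && fcgUnescaped l i)).map
    (fun i => (i, l.getD i ' '))

-- pure fold over bracket events mirroring A's found/first/groups logic
def fcgPairFold : List (Nat × Char) → List (Int × Int) → Bool → Int → List (Int × Int)
  | [], g, _, _ => g
  | (i, c) :: rest, g, found, first =>
    if c = '[' ∧ ¬ (found = true) then fcgPairFold rest g true (i : Int)
    else if c = ']' ∧ found = true then fcgPairFold rest (g ++ [(first, (i : Int))]) found first
    else fcgPairFold rest g found first

-- closed form of the fold: first open paired with every later close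
def fcgPairSpec (ev : List (Nat × Char)) : List (Int × Int) :=
  match ev.filter (fun e => e.2 == '[') with
  | [] => []
  | (f, _) :: _ =>
    ((ev.filter (fun e => e.2 == ']')).filter (fun e => f < e.1)).map
      (fun e => ((f : Int), (e.1 : Int)))

theorem fcgBackJ_le (l : List Char) : ∀ j, fcgBackJ l j ≤ j := by
  intro j; induction j with
  | zero => simp [fcgBackJ]
  | succ j ih => rw [fcgBackJ]; split
                 · omega
                 · omega

theorem fcgBackJ_succ_bs (l : List Char) (j : Nat) (h : l.getD j ' ' = '\\') :
    fcgBackJ l (j + 1) = fcgBackJ l j := by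
  rw [fcgBackJ, if_pos h]

theorem fcgBackJ_succ_not (l : List Char) (j : Nat) (h : ¬ l.getD j ' ' = '\\') :
    fcgBackJ l (j + 1) = j + 1 := by
  rw [fcgBackJ, if_neg h]

-- Main bridge: A's scan over the suffix from k equals the pure fold over active bracket
-- events, provided the backslash run ending just before k is even (escaped = False).
theorem fcgMain (l : List Char) : ∀ (m : Nat), ∀ (k : Nat), l.length - k ≤ m →
    (k - fcgBackJ l k) % 2 = 0 →
    ∀ (groups : List (Int × Int)) (found : Bool) (first : Int),
    findCharGroupsLoopA (l.drop k) (k : Int) groups false found first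
      = fcgPairFold (fcgEvents l k (l.length - k)) groups found first := by
  intro m
  induction m with
  | zero =>
    intro k hk _ groups found first
    have hle : l.length ≤ k := by omega
    have h0 : l.length - k = 0 := by omega
    rw [List.drop_eq_nil_of_le hle, h0]
    simp [findCharGroupsLoopA, fcgEvents, fcgPairFold]
  | succ m ih =>
    intro k hk hpar groups found first
    by_cases hlt : k < l.length
    case neg =>
      have hle : l.length ≤ k := by omega
      have h0 : l.length - k = 0 := by omega
      rw [List.drop_eq_nil_of_le hle, h0]
      simp [findCharGroupsLoopA, fcgEvents, fcgPairFold]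
    case pos =>
      have hdrop := List.drop_eq_getElem_cons hlt
      have hg : l.getD k ' ' = l[k] := List.getD_eq_getElem l ' ' hlt
      have hrange : List.range' k (l.length - k)
          = k :: List.range' (k+1) (l.length - (k+1)) := by
        rw [show l.length - k = (l.length - (k+1)) + 1 by omega, List.range'_succ]
      have hble := fcgBackJ_le l k
      by_cases hc : l.getD k ' ' = '\\'
      · -- backslash at k: A sets escaped; parity rejects position k+1
        have hcond : ((l.getD k ' ' == '[' || l.getD k ' ' == ']') && fcgUnescaped l k)
            = false := by rw [hc]; simp
        have hev : fcgEvents l k (l.length - k) = fcgEvents l (k+1) (l.length - (k+1)) := by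
          unfold fcgEvents
          rw [hrange]
          simp only [List.filter_cons]
          rw [hcond]
          simp
        rw [hev, hdrop, findCharGroupsLoopA, if_pos (hg ▸ hc)]
        have hc1 : (k : Int) + 1 = ((k+1 : Nat) : Int) := by push_cast; ring
        rw [hc1]
        by_cases hlt2 : k + 1 < l.length
        case neg =>
          have hle2 : l.length ≤ k + 1 := by omega
          have h02 : l.length - (k+1) = 0 := by omega
          rw [List.drop_eq_nil_of_le hle2, h02]
          simp [findCharGroupsLoopA, fcgEvents, fcgPairFold]
        case pos =>
          have hdrop2 := List.drop_eq_getElem_cons hlt2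
          have hg2 : l.getD (k+1) ' ' = l[k+1] := List.getD_eq_getElem l ' ' hlt2
          have hbk1 : fcgBackJ l (k+1) = fcgBackJ l k := fcgBackJ_succ_bs l k hc
          have hunesc1 : fcgUnescaped l (k+1) = false := by
            simp only [fcgUnescaped, hbk1, beq_eq_false_iff_ne, ne_eq]
            omega
          have hcond1 : ((l.getD (k+1) ' ' == '[' || l.getD (k+1) ' ' == ']')
              && fcgUnescaped l (k+1)) = false := by rw [hunesc1]; simp
          have hev2 : fcgEvents l (k+1) (l.length - (k+1))
              = fcgEvents l (k+2) (l.length - (k+2)) := by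
            unfold fcgEvents
            rw [show l.length - (k+1) = (l.length - (k+2)) + 1 by omega, List.range'_succ]
            simp only [List.filter_cons]
            rw [hcond1]
            simp
          rw [hev2, hdrop2, findCharGroupsLoopA]
          have hc2 : ((k+1 : Nat) : Int) + 1 = ((k+2 : Nat) : Int) := by push_cast; ring
          by_cases hd : l.getD (k+1) ' ' = '\\'
          · rw [if_pos (hg2 ▸ hd)]
            have hbk2 : fcgBackJ l (k+2) = fcgBackJ l k := by
              rw [fcgBackJ_succ_bs l (k+1) hd, hbk1]
            have hpar2 : (k+2 - fcgBackJ l (k+2)) % 2 = 0 := by rw [hbk2]; omega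
            have h := ih (k+2) (by omega) hpar2 groups found first
            rw [hc2]; exact h
          · rw [if_neg (hg2 ▸ hd)]
            have hbk2 : fcgBackJ l (k+2) = k + 2 := fcgBackJ_succ_not l (k+1) hd
            have hpar2 : (k+2 - fcgBackJ l (k+2)) % 2 = 0 := by rw [hbk2]; omega
            have h := ih (k+2) (by omega) hpar2 groups found first
            rw [hc2]; exact h
      · -- no backslash at k: escaped stays false; position k is unescaped
        have hunesc : fcgUnescaped l k = true := by
          simp [fcgUnescaped, hpar]
        have hbk1 : fcgBackJ l (k+1) = k + 1 := fcgBackJ_succ_not l k hc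
        have hpar1 : (k+1 - fcgBackJ l (k+1)) % 2 = 0 := by rw [hbk1]; omega
        have hc1 : (k : Int) + 1 = ((k+1 : Nat) : Int) := by push_cast; ring
        rw [hdrop, findCharGroupsLoopA, if_neg (hg ▸ hc)]
        simp only [Bool.false_eq_true, if_false]
        by_cases hb : l.getD k ' ' = '[' ∨ l.getD k ' ' = ']'
        · have hkeep : ((l.getD k ' ' == '[' || l.getD k ' ' == ']') && fcgUnescaped l k)
              = true := by
            rcases hb with h | h <;> rw [h] <;> simp [hunesc]
          have hev : fcgEvents l k (l.length - k)
              = (k, l.getD k ' ') :: fcgEvents l (k+1) (l.length - (k+1)) := by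
            unfold fcgEvents
            rw [hrange]
            simp only [List.filter_cons]
            rw [hkeep]
            simp
          rw [hev, fcgPairFold]
          by_cases h1 : l.getD k ' ' = '[' ∧ ¬ (found = true)
          · rw [if_pos ⟨hg ▸ h1.1, h1.2⟩, if_pos h1]
            have h := ih (k+1) (by omega) hpar1 groups true (k : Int)
            rw [hc1]; exact h
          · rw [if_neg (by rw [← hg]; exact h1), if_neg h1]
            by_cases h2 : l.getD k ' ' = ']' ∧ found = true
            · rw [if_pos ⟨hg ▸ h2.1, h2.2⟩, if_pos h2]
              have h := ih (k+1) (by omega) hpar1 (groups ++ [(first, (k : Int))]) found first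
              rw [hc1]; exact h
            · rw [if_neg (by rw [← hg]; exact h2), if_neg h2]
              have h := ih (k+1) (by omega) hpar1 groups found first
              rw [hc1]; exact h
        · have hb1 : ¬ l.getD k ' ' = '[' := fun h => hb (Or.inl h)
          have hb2 : ¬ l.getD k ' ' = ']' := fun h => hb (Or.inr h)
          have hx1 : (l.getD k ' ' == '[') = false := beq_eq_false_iff_ne.mpr hb1
          have hx2 : (l.getD k ' ' == ']') = false := beq_eq_false_iff_ne.mpr hb2
          have hcond : ((l.getD k ' ' == '[' || l.getD k ' ' == ']') && fcgUnescaped l k)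
              = false := by rw [hx1, hx2]; rfl
          have hev : fcgEvents l k (l.length - k) = fcgEvents l (k+1) (l.length - (k+1)) := by
            unfold fcgEvents
            rw [hrange]
            simp only [List.filter_cons]
            rw [hcond]
            simp
          rw [hev]
          rw [if_neg (by rw [← hg]; rintro ⟨h, -⟩; exact hb1 h),
            if_neg (by rw [← hg]; rintro ⟨h, -⟩; exact hb2 h)]
          have h := ih (k+1) (by omega) hpar1 groups found first
          rw [hc1]; exact h

-- found phase: every later close is paired with the latched first
theorem fcgPairFold_found (ev : List (Nat × Char)) : ∀ (g : List (Int × Int)) (f : Int),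
    fcgPairFold ev g true f
      = g ++ (ev.filter (fun e => e.2 == ']')).map (fun e => (f, (e.1 : Int))) := by
  induction ev with
  | nil => intro g f; simp [fcgPairFold]
  | cons e rest ih =>
    intro g f
    obtain ⟨i, c⟩ := e
    rw [fcgPairFold, if_neg (by rintro ⟨-, h⟩; exact h rfl)]
    by_cases hc : c = ']'
    · rw [if_pos ⟨hc, rfl⟩, ih]
      have hf : ((i, c) :: rest).filter (fun e => e.2 == ']')
          = (i, c) :: rest.filter (fun e => e.2 == ']') := by
        simp [hc]
      rw [hf]
      simp
    · rw [if_neg (by rintro ⟨h, -⟩; exact hc h), ih]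
      have hf : ((i, c) :: rest).filter (fun e => e.2 == ']')
          = rest.filter (fun e => e.2 == ']') := by
        simp [hc]
      rw [hf]

theorem fcgPairSpec_open (i : Nat) (rest : List (Nat × Char))
    (h : ∀ e ∈ rest, i < e.1) :
    fcgPairSpec ((i, '[') :: rest)
      = (rest.filter (fun e => e.2 == ']')).map (fun e => ((i : Int), (e.1 : Int))) := by
  unfold fcgPairSpec
  have h1 : ((i, '[') :: rest).filter (fun e => e.2 == '[')
      = (i, '[') :: rest.filter (fun e => e.2 == '[') := by simp
  have h2 : ((i, '[') :: rest).filter (fun e => e.2 == ']')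
      = rest.filter (fun e => e.2 == ']') := by simp
  rw [h1, h2]
  have h3 : (rest.filter (fun e => e.2 == ']')).filter (fun e => i < e.1)
      = rest.filter (fun e => e.2 == ']') := by
    apply List.filter_eq_self.mpr
    intro e he
    simpa using h e (List.mem_of_mem_filter he)
  simp [h3]

theorem fcgPairSpec_close (i : Nat) (rest : List (Nat × Char))
    (h : ∀ e ∈ rest, i < e.1) :
    fcgPairSpec ((i, ']') :: rest) = fcgPairSpec rest := by
  unfold fcgPairSpec
  have h1 : ((i, ']') :: rest).filter (fun e => e.2 == '[')
      = rest.filter (fun e => e.2 == '[') := by simp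
  have h2 : ((i, ']') :: rest).filter (fun e => e.2 == ']')
      = (i, ']') :: rest.filter (fun e => e.2 == ']') := by simp
  rw [h1, h2]
  rcases ho : rest.filter (fun e => e.2 == '[') with _ | ⟨⟨f, d⟩, os⟩
  · rw [ho]
  · have hf : i < f := by
      have hmem : (f, d) ∈ rest.filter (fun e => e.2 == '[') := by
        rw [ho]; exact List.mem_cons_self
      exact h (f, d) (List.mem_of_mem_filter hmem)
    have h4 : ((i, ']') :: rest.filter (fun e => e.2 == ']')).filter (fun e => f < e.1)
        = (rest.filter (fun e => e.2 == ']')).filter (fun e => f < e.1) := by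
      simp [Nat.not_lt.mpr (Nat.le_of_lt hf)]
    rw [ho]; dsimp only; rw [h4]

theorem fcgPairSpec_other (i : Nat) (c : Char) (rest : List (Nat × Char))
    (hc1 : ¬ c = '[') (hc2 : ¬ c = ']') :
    fcgPairSpec ((i, c) :: rest) = fcgPairSpec rest := by
  unfold fcgPairSpec
  have h1 : ((i, c) :: rest).filter (fun e => e.2 == '[')
      = rest.filter (fun e => e.2 == '[') := by simp [hc1]
  have h2 : ((i, c) :: rest).filter (fun e => e.2 == ']')
      = rest.filter (fun e => e.2 == ']') := by simp [hc2]
  rw [h1, h2]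

-- search phase: the first open latches; closes before it are exactly the ones the
-- (f < ·) filter removes, because events are strictly sorted by position
theorem fcgPairFold_notfound (ev : List (Nat × Char)) :
    ev.Pairwise (fun a b => a.1 < b.1) → ∀ (g : List (Int × Int)) (fi : Int),
    fcgPairFold ev g false fi = g ++ fcgPairSpec ev := by
  induction ev with
  | nil => intro _ g fi; simp [fcgPairFold, fcgPairSpec]
  | cons e rest ih =>
    intro hp g fi
    obtain ⟨i, c⟩ := e
    rw [List.pairwise_cons] at hp
    obtain ⟨hall, hps⟩ := hp
    rw [fcgPairFold]
    by_cases hco : c = '['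
    · rw [if_pos ⟨hco, by simp⟩, fcgPairFold_found rest g (i : Int)]
      subst hco
      rw [fcgPairSpec_open i rest hall]
    · rw [if_neg (by rintro ⟨h, -⟩; exact hco h)]
      by_cases hc : c = ']'
      · rw [if_neg (by rintro ⟨-, h⟩; simp at h), ih hps g fi]
        subst hc
        rw [fcgPairSpec_close i rest hall]
      · rw [if_neg (by rintro ⟨h, -⟩; exact hc h), ih hps g fi]
        rw [fcgPairSpec_other i c rest hco hc]

theorem fcgBoolOpen (x : Char) (u : Bool) :
    (x == '[' && ((x == '[' || x == ']') && u)) = (x == '[' && u) := by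
  by_cases h : x = '['
  · rw [h]; rfl
  · rw [beq_eq_false_iff_ne.mpr h]; rfl

theorem fcgBoolClose (x : Char) (u : Bool) :
    (x == ']' && ((x == '[' || x == ']') && u)) = (x == ']' && u) := by
  by_cases h : x = ']'
  · rw [h]; rfl
  · rw [beq_eq_false_iff_ne.mpr h]; rfl

theorem fcg_alt_eq (s : String) :
    find_char_groups_alt s =
      (match (List.range s.toList.length).filter
          (fun i => s.toList.getD i ' ' == '[' && fcgUnescaped s.toList i) with
      | [] => []
      | first :: _ =>
        (((List.range s.toList.length).filter
            (fun i => s.toList.getD i ' ' == ']' && fcgUnescaped s.toList i)).filter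
          (fun j => first < j)).map (fun j => ((first : Int), (j : Int)))) := rfl

theorem fcg_final (s : String) : find_char_groups s = find_char_groups_alt s := by
  unfold find_char_groups
  rw [fcg_alt_eq]
  have hr : List.range s.toList.length = List.range' 0 s.toList.length := List.range_eq_range'
  have hmain := fcgMain s.toList s.toList.length 0 (by omega) (by simp [fcgBackJ]) [] false 0
  simp only [List.drop_zero, Nat.sub_zero, Nat.cast_zero] at hmain
  rw [hmain]
  have hsorted : (fcgEvents s.toList 0 s.toList.length).Pairwise (fun a b => a.1 < b.1) := by
    unfold fcgEvents
    apply List.pairwise_map.mpr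
    exact (hr ▸ List.pairwise_lt_range).filter _
  rw [fcgPairFold_notfound _ hsorted [] 0, List.nil_append]
  have hopen : (fcgEvents s.toList 0 s.toList.length).filter (fun e => e.2 == '[')
      = ((List.range s.toList.length).filter
          (fun i => s.toList.getD i ' ' == '[' && fcgUnescaped s.toList i)).map
        (fun i => (i, s.toList.getD i ' ')) := by
    unfold fcgEvents
    rw [hr, List.filter_map, List.filter_filter]
    apply congrArg
    apply List.filter_congr
    intro i _
    exact fcgBoolOpen _ _
  have hclose : (fcgEvents s.toList 0 s.toList.length).filter (fun e => e.2 == ']')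
      = ((List.range s.toList.length).filter
          (fun i => s.toList.getD i ' ' == ']' && fcgUnescaped s.toList i)).map
        (fun i => (i, s.toList.getD i ' ')) := by
    unfold fcgEvents
    rw [hr, List.filter_map, List.filter_filter]
    apply congrArg
    apply List.filter_congr
    intro i _
    exact fcgBoolClose _ _
  unfold fcgPairSpec
  rw [hopen, hclose]
  rcases hop : (List.range s.toList.length).filter
      (fun i => s.toList.getD i ' ' == '[' && fcgUnescaped s.toList i) with _ | ⟨f0, rest0⟩
  · rfl
  · dsimp only [List.map_cons]
    rw [List.filter_map, List.map_map]
    have hfm : ∀ (l : List Nat),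
        List.flatMap (fun a => ([((a : Nat) : Int)] : List Int)) l
          = l.map (fun a => ((a : Nat) : Int)) := by
      intro l; induction l with
      | nil => rfl
      | cons a l ih => simp [List.flatMap_cons, ih]
    simp [Function.comp_def, hfm, List.map_map]

-- ===== VERDICT (by name: the statement is the Claim_ definition above) =====
theorem find_char_groups_spec : Claim_equal_find_char_groups := by
  intro s _
  unfold Spec_find_char_groups
  exact fcg_final s
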